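-- pv_equiv track=rewrite | github.com/frhanjav/socket-lab | viraj/hamming/hamming_utils.py | _calculate_min_parity_bits
-- ===== SOURCE A (Python) =====
-- def _calculate_min_parity_bits(total_length):
--     """Calculate how many parity bits r are present in a code of total_length n. (number of powers of 2 <= n)"""
--     if total_length < 1:
--         return 0
--     r = 0
--     power_of_2 = 1
--     while power_of_2 <= total_length:
--         r += 1
--         power_of_2 *= 2
--     return r
-- ===== SOURCE B (Python) =====
-- def _calculate_min_parity_bits(total_length):
--     """Number of powers of two not exceeding total_length, via int.bit_length (closed form, no loop)."""
--     if total_length < 1: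
--         return 0
--     return total_length.bit_length()
-- ===== Notes on version B (the rewrite author's own statement) =====
-- stated objective: idiomatic
-- what changed: Replaces the doubling loop with Python's int.bit_length closed form, which for positive n equals the count of powers of two not exceeding n.
import Mathlib
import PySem

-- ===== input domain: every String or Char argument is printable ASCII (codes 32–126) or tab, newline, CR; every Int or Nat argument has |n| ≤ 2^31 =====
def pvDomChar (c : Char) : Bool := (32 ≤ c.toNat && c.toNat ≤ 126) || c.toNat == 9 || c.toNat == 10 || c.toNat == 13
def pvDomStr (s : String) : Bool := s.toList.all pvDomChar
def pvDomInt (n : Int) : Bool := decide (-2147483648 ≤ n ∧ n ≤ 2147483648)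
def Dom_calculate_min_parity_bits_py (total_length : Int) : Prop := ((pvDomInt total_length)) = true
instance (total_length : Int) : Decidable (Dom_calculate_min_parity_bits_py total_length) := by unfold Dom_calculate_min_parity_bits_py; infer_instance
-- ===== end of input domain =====

-- ===== PORT A =====
-- literal port of A's while-loop: r counts iterations, power_of_2 doubles
def pvLoopA (total_length r power : Int) (hp : 0 < power) : Int :=
  if power ≤ total_length then
    pvLoopA total_length (r + 1) (power * 2) (by omega)
  else r
termination_by (total_length + 1 - power).toNat
decreasing_by omega

def calculate_min_parity_bits_py (total_length : Int) : Int :=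
  if total_length < 1 then 0
  else pvLoopA total_length 0 1 (by omega)

-- ===== PORT B =====
-- Source B: guard, then total_length.bit_length(), ported as Nat.size (Python's bit_length on nonnegative ints)
def calculate_min_parity_bits_py_alt (total_length : Int) : Int :=
  if total_length < 1 then 0
  else (total_length.toNat.size : Int)

-- ===== PRECONDITION & SPEC =====
def Spec_calculate_min_parity_bits_py (total_length : Int) (out : Int) : Prop := out = calculate_min_parity_bits_py_alt total_length
instance (total_length : Int) (out : Int) : Decidable (Spec_calculate_min_parity_bits_py total_length out) := by unfold Spec_calculate_min_parity_bits_py; infer_instance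

-- ===== CLAIM (what is proved, stated in full; the proofs are below) =====
def Claim_equal_calculate_min_parity_bits_py : Prop := ∀ (total_length : Int), Dom_calculate_min_parity_bits_py total_length → Spec_calculate_min_parity_bits_py total_length (calculate_min_parity_bits_py total_length)

-- ===== LEMMAS AND PROOFS =====

-- loop invariant: starting from power = 2^k, the loop adds (size t.toNat - k) to r
theorem pvLoopA_size (t : Int) (ht : 1 ≤ t) :
    ∀ (d k : ℕ), t.toNat.size - k = d → ∀ r : Int,
      pvLoopA t r ((2 : Int) ^ k) (by positivity) = r + ((t.toNat.size - k : ℕ) : Int) := by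
  intro d
  induction d with
  | zero =>
    intro k hk r
    rw [pvLoopA]
    have hks : ¬ k < t.toNat.size := by omega
    have h2 : ¬ ((2 : ℕ) ^ k ≤ t.toNat) := by
      rw [← Nat.lt_size]; exact hks
    have h2' : ¬ ((2 : Int) ^ k ≤ t) := by
      intro h
      apply h2
      have : ((2 : ℕ) ^ k : Int) ≤ (t.toNat : Int) := by push_cast; omega
      exact_mod_cast this
    rw [if_neg h2', hk]
    simp
  | succ d ih =>
    intro k hk r
    rw [pvLoopA]
    have hks : k < t.toNat.size := by omega
    have h2 : (2 : ℕ) ^ k ≤ t.toNat := Nat.lt_size.mp hks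
    have h2' : (2 : Int) ^ k ≤ t := by
      have : ((2 : ℕ) ^ k : Int) ≤ (t.toNat : Int) := by exact_mod_cast h2
      push_cast at this; omega
    rw [if_pos h2']
    have hpow : (2 : Int) ^ k * 2 = (2 : Int) ^ (k + 1) := by ring
    have := ih (k + 1) (by omega) (r + 1)
    rw [show pvLoopA t (r + 1) ((2:Int)^k * 2) (by positivity) =
          pvLoopA t (r + 1) ((2:Int)^(k+1)) (by positivity) from by congr 1]
    rw [this]
    have : t.toNat.size - k = (t.toNat.size - (k + 1)) + 1 := by omega
    rw [this]
    push_cast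
    ring

-- ===== VERDICT (by name: the statement is the Claim_ definition above) =====
theorem calculate_min_parity_bits_py_spec : Claim_equal_calculate_min_parity_bits_py := by
  intro t _
  unfold Spec_calculate_min_parity_bits_py calculate_min_parity_bits_py calculate_min_parity_bits_py_alt
  split_ifs with h
  · rfl
  · have ht : 1 ≤ t := by omega
    have := pvLoopA_size t ht (t.toNat.size - 0) 0 rfl 0
    simpa using this
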